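-- pv_equiv track=rewrite | github.com/seanfaulkner2004/UniversityWorkPython | 2024/COSC131-S1/exam_prep.py | last_successor
-- ===== SOURCE A (Python) =====
-- def last_successor(items, target):
--     """sldjfvbklhjkgv"""
--     result = None
--     last_num = None
--     for num in items:
--         if last_num == target:
--             result = num
--         last_num=num
--     if len(items) > 1:
--         if items[-1] == target:
--             result = None
--     return result
-- ===== SOURCE B (Python) =====
-- def last_successor(items, target):
--     """Backward scan: first match from the end is the last occurrence."""
--     n = len(items)
--     for i in range(n - 1, -1, -1):
--         if items[i] == target:
--             return None if i == n - 1 else items[i + 1]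
--     return None
-- ===== Notes on version B (the rewrite author's own statement) =====
-- stated objective: simpler
-- what changed: Replaced the forward full pass maintaining a running result plus a last-element cleanup guard with a backward early-exiting scan that returns at the last occurrence of target.
import Mathlib
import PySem

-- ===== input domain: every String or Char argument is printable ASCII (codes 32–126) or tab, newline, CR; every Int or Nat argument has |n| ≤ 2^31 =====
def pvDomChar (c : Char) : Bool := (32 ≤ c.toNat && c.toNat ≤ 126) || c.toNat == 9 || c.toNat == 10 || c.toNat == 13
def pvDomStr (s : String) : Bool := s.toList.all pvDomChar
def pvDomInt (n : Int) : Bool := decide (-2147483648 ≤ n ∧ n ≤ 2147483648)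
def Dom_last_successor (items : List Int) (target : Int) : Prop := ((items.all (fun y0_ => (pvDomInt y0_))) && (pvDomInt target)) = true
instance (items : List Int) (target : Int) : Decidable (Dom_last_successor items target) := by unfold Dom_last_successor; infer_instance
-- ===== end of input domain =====

-- B replaces A's forward pass (running result + end-of-list cleanup guard) by a backward
-- early-exiting scan; objective: simpler.

-- ===== PORT A =====
-- state = (result, last_num); Python's 'last_num == target' is False while last_num is None,
-- so the condition is 'last_num = some target'.
def last_successor (items : List Int) (target : Int) : Option Int :=
  let st := items.foldl
    (fun (st : Option Int × Option Int) num =>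
      (if st.2 = some target then some num else st.1, some num))
    (none, none)
  let result := st.1
  if items.length > 1 then
    if PySem.List.pyGet? items (-1) = some target then none else result
  else result

-- ===== PORT B =====
-- transcription of Source B's 'for i in range(n-1, -1, -1)': k counts the remaining indices,
-- the current index is i = k-1; items[i]/items[i+1] are always in range when this is
-- called with k ≤ items.length, so getD is exact there.
def lsAux (items : List Int) (target : Int) : Nat → Option Int
  | 0 => none
  | (i+1) =>
    if items.getD i 0 = target then
      (if i = items.length - 1 then none else some (items.getD (i+1) 0))
    else lsAux items target i

def last_successor_alt (items : List Int) (target : Int) : Option Int :=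
  lsAux items target items.length

-- ===== PRECONDITION & SPEC =====
def Spec_last_successor (items : List Int) (target : Int) (out : Option Int) : Prop := out = last_successor_alt items target
instance (items : List Int) (target : Int) (out : Option Int) : Decidable (Spec_last_successor items target out) := by unfold Spec_last_successor; infer_instance

-- ===== CLAIM (what is proved, stated in full; the proofs are below) =====
def Claim_equal_last_successor : Prop := ∀ (items : List Int) (target : Int), Dom_last_successor items target → Spec_last_successor items target (last_successor items target)

-- ===== LEMMAS AND PROOFS =====

-- proof-only helper: g l t k scans indices k-1 … 0; at the first hit i it returns
-- some (l[i+1]?) (none inside = hit at the very end), and none if there is no hit.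
def g (l : List Int) (t : Int) : Nat → Option (Option Int)
  | 0 => none
  | (i+1) => if l.getD i 0 = t then some l[i+1]? else g l t i

theorem lsAux_eq_g_join (l : List Int) (t : Int) :
    ∀ k, k ≤ l.length → lsAux l t k = (g l t k).join := by
  intro k
  induction k with
  | zero => intro _; simp [lsAux, g]
  | succ i ih =>
    intro hk
    by_cases h : l.getD i 0 = t
    · have hi : i < l.length := Nat.lt_of_lt_of_le (Nat.lt_succ_self i) hk
      simp only [lsAux, g, h, if_pos]
      by_cases he : i = l.length - 1
      · have h1 : l.length ≤ i + 1 := by omega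
        rw [List.getElem?_eq_none h1]
        simp [he]
      · have hlt : i + 1 < l.length := by omega
        simp [he, List.getD_eq_getElem?_getD, List.getElem?_eq_getElem hlt]
    · simp only [lsAux, g, h, if_neg, not_false_iff]
      exact ih (Nat.le_of_succ_le hk)

-- appending an element does not change g on the old indices
theorem g_concat (l : List Int) (x t : Int) :
    ∀ k, k ≤ l.length → g (l ++ [x]) t k = (g l t k).map (fun o => some (o.getD x)) := by
  intro k
  induction k with
  | zero => intro _; simp [g]
  | succ i ih =>
    intro hk
    have hi : i < l.length := Nat.lt_of_lt_of_le (Nat.lt_succ_self i) hk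
    have hgd : (l ++ [x]).getD i 0 = l.getD i 0 := by
      simp [List.getD_eq_getElem?_getD, List.getElem?_append_left hi]
    by_cases h : l.getD i 0 = t
    · simp only [g, hgd, h, if_pos]
      by_cases he : i + 1 < l.length
      · simp [List.getElem?_append_left he, List.getElem?_eq_getElem he]
      · have h1 : i + 1 = l.length := by omega
        simp [h1]
    · simp only [g, hgd, h, if_neg, not_false_iff]
      exact ih (Nat.le_of_succ_le hk)

-- the fold of A: second component tracks the last element
def folA (l : List Int) (t : Int) : Option Int × Option Int :=
  l.foldl (fun st num => (if st.2 = some t then some num else st.1, some num)) (none, none)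

theorem folA_snd (l : List Int) (t : Int) : (folA l t).2 = l.getLast? := by
  induction l using List.reverseRecOn with
  | nil => simp [folA]
  | append_singleton l x ih => simp [folA, List.foldl_append]

-- invariant: the fold's running result is the join of g over all indices except the last
theorem folA_fst (l : List Int) (t : Int) :
    (folA l t).1 = (g l t (l.length - 1)).join := by
  induction l using List.reverseRecOn with
  | nil => simp [folA, g]
  | append_singleton l x ih =>
    have hstep : (folA (l ++ [x]) t).1 =
        (if (folA l t).2 = some t then some x else (folA l t).1) := by
      simp [folA, List.foldl_append]
    rw [hstep, folA_snd, ih]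
    have hlen : (l ++ [x]).length - 1 = l.length := by simp
    rw [hlen]
    cases hl : l.eq_nil_or_concat' with
    | inl h => subst h; simp [g]
    | inr h =>
      obtain ⟨l', y, rfl⟩ := h
      have hy : (l' ++ [y]).getLast? = some y := by simp
      have hlen2 : (l' ++ [y]).length = l'.length + 1 := by simp
      have hgd : (l' ++ [y] ++ [x]).getD l'.length 0 = y := by
        simp [List.getD_eq_getElem?_getD]
      by_cases h : y = t
      · simp [h, g]
      · have hne : (l' ++ [y]).getLast? ≠ some t := by simp [hy, h]
        simp only [hy, Option.some.injEq, h, if_false, hlen2, g, hgd]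
        rw [g_concat _ x t l'.length (by simp)]
        -- every hit of g at index i ≤ l'.length - 1 has i+1 ≤ l'.length < length, so the
        -- mapped adjustment is the identity on the join
        have hsub : l'.length ≤ (l' ++ [y]).length - 1 := by simp
        -- show join ∘ map f = join here by cases on g's value
        cases hg : g (l' ++ [y]) t l'.length with
        | none => simp [hg]
        | some o =>
          cases o with
          | none =>
            -- a hit with l[i+1]? = none would need i+1 ≥ length, impossible for i < l'.length
            exfalso
            have : ∀ k, k ≤ l'.length → g (l' ++ [y]) t k = some none → False := by
              intro k
              induction k with
              | zero => intro _ h; simp [g] at h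
              | succ i ih2 =>
                intro hk hsome
                simp only [g] at hsome
                split at hsome
                · have hi1 : i + 1 < (l' ++ [y]).length := by simp; omega
                  simp [List.getElem?_eq_getElem hi1] at hsome
                · exact ih2 (Nat.le_of_succ_le hk) hsome
            exact this l'.length (le_refl _) hg
          | some v => simp [hg]

-- ===== VERDICT (by name: the statement is the Claim_ definition above) =====
theorem last_successor_spec : Claim_equal_last_successor := by
  intro items target _
  unfold Spec_last_successor last_successor last_successor_alt
  rw [lsAux_eq_g_join items target items.length (le_refl _)]
  show (if items.length > 1 then
      if PySem.List.pyGet? items (-1) = some target then none else (folA items target).1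
    else (folA items target).1) = (g items target items.length).join
  cases items.eq_nil_or_concat' with
  | inl h => subst h; simp [folA, g]
  | inr h =>
    obtain ⟨l, y, rfl⟩ := h
    have hlast : PySem.List.pyGet? (l ++ [y]) (-1) = some y := by
      rw [PySem.List.pyGet?_neg_one]; simp
    have hlen : (l ++ [y]).length = l.length + 1 := by simp
    have hgd : (l ++ [y]).getD l.length 0 = y := by
      simp [List.getD_eq_getElem?_getD]
    have hnone : (l ++ [y])[l.length + 1]? = none := by
      apply List.getElem?_eq_none; simp
    by_cases hy : y = target
    · -- last element is the target: both sides are none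
      have hg : (g (l ++ [y]) target (l ++ [y]).length).join = none := by
        rw [hlen]; simp [g, hy]
      rw [hg]
      by_cases hl : l.length > 0
      · have hgt : (l ++ [y]).length > 1 := by omega
        rw [if_pos hgt, if_pos (by rw [hlast, hy])]
      · have hl0 : l = [] := List.eq_nil_of_length_eq_zero (by omega)
        subst hl0
        simp [folA]
    · -- last element is not the target: cleanup does not fire, g skips the last index
      have hg : g (l ++ [y]) target (l ++ [y]).length = g (l ++ [y]) target l.length := by
        rw [hlen]; simp [g, hy]
      rw [hg]
      have hf := folA_fst (l ++ [y]) target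
      rw [(by simp : (l ++ [y]).length - 1 = l.length)] at hf
      rw [← hf]
      by_cases hgt : (l ++ [y]).length > 1
      · rw [if_pos hgt, if_neg (by rw [hlast]; simp [hy])]
      · rw [if_neg hgt]
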